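-- pv_equiv track=rewrite | github.com/hongyiheng/lc-base-on-doocs | Math/1175.Prime Arrangements/Solution.py | numPrimeArrangements
-- ===== SOURCE A (Python) =====
-- def numPrimeArrangements(n: int) -> int:
--     primes = [0] * (n + 1)
--     idx, cnt = 2, 1
--     while idx * idx <= n:
--         if primes[idx] == 0:
--             for j in range(idx * idx, n + 1, idx):
--                 if primes[j] == 0:
--                     primes[j] = 1
--                     cnt += 1
--         idx += 1
--     prime_num = n - cnt
--     ans, mod = 1, int(1e9 + 7)
--     for i in range(prime_num, 0, -1):
--         ans = ans * i % mod
--     for i in range(cnt, 0, -1):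
--         ans = ans * i % mod
--     return int(ans % mod)
-- ===== SOURCE B (Python) =====
-- def numPrimeArrangements(n: int) -> int:
--     mod = 1000000007
--
--     def is_prime(k: int) -> bool:
--         if k < 2:
--             return False
--         d = 2
--         while d * d <= k:
--             if k % d == 0:
--                 return False
--             d += 1
--         return True
--
--     p = 0
--     for k in range(2, n + 1):
--         if is_prime(k):
--             p += 1
--     ans = 1
--     for i in range(1, p + 1):
--         ans = ans * i % mod
--     for i in range(1, n - p + 1):
--         ans = ans * i % mod
--     return ans
-- ===== Notes on version B (the rewrite author's own statement) =====
-- stated objective: idiomatic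
-- what changed: Replaces the mutable sieve-of-Eratosthenes array and the two descending factorial loops by a trial-division is_prime helper counting primes upward plus two ascending modular factorial loops (no array maintained).
import Mathlib
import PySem

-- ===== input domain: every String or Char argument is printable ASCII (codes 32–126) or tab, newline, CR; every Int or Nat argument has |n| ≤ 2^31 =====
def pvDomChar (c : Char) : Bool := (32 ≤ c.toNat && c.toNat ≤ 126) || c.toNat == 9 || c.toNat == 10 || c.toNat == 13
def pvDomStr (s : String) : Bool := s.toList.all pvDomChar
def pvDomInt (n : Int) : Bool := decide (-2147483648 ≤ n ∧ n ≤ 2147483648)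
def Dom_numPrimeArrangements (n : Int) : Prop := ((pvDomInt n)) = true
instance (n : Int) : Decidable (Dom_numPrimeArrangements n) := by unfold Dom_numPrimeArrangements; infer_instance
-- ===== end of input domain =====

-- B replaces A's sieve array and descending factorial loops by a trial-division is_prime
-- counter and ascending modular factorial loops (idiomatic restructuring; not faster).

-- ===== PORT A =====
-- body of 'for j in range(idx*idx, n+1, idx)'; primes[j] read/write: j is provably
-- nonnegative and in range here, so pyGetD / List.set are exact for Python's primes[j]
def pvSieveInner (st : List Int × Int) (j : Int) : List Int × Int :=
  if PySem.List.pyGetD st.1 j 0 == 0 then (st.1.set j.toNat 1, st.2 + 1) else st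

-- the 'while idx * idx <= n' loop
def pvSieveLoop (n : Int) (primes : List Int) (cnt : Int) (idx : Int) : List Int × Int :=
  if h : idx * idx ≤ n then
    if PySem.List.pyGetD primes idx 0 == 0 then
      let st := (PySem.List.pyRange (idx * idx) (n + 1) idx).foldl pvSieveInner (primes, cnt)
      pvSieveLoop n st.1 st.2 (idx + 1)
    else pvSieveLoop n primes cnt (idx + 1)
  else (primes, cnt)
termination_by (n + 1 - idx).toNat
decreasing_by
  all_goals
    have h1 : idx ≤ n := by nlinarith [mul_self_nonneg idx, mul_self_nonneg (idx - 1)]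
    omega

def numPrimeArrangements (n : Int) : Int :=
  let primes := List.replicate (n + 1).toNat (0 : Int)  -- [0] * (n + 1)
  let st := pvSieveLoop n primes 1 2
  let primeNum := n - st.2
  let m : Int := 1000000007  -- int(1e9 + 7)
  let ans1 := (PySem.List.pyRange primeNum 0 (-1)).foldl (fun a i => PySem.Int.mod (a * i) m) 1
  let ans2 := (PySem.List.pyRange st.2 0 (-1)).foldl (fun a i => PySem.Int.mod (a * i) m) ans1
  PySem.Int.mod ans2 m

-- ===== PORT B =====
-- 'while d * d <= k' trial-division loop of is_prime
def pvTrialLoop (k : Int) (d : Int) : Bool :=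
  if h : d * d ≤ k then
    if PySem.Int.mod k d == 0 then false else pvTrialLoop k (d + 1)
  else true
termination_by (k + 1 - d).toNat
decreasing_by
  have h1 : d ≤ k := by nlinarith [mul_self_nonneg d, mul_self_nonneg (d - 1)]
  omega

def pvIsPrime (k : Int) : Bool :=
  if k < 2 then false else pvTrialLoop k 2

def numPrimeArrangements_alt (n : Int) : Int :=
  let m : Int := 1000000007
  let p := (PySem.List.pyRange 2 (n + 1) 1).foldl
    (fun acc k => if pvIsPrime k then acc + 1 else acc) 0
  let a1 := (PySem.List.pyRange 1 (p + 1) 1).foldl (fun a i => PySem.Int.mod (a * i) m) 1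
  (PySem.List.pyRange 1 (n - p + 1) 1).foldl (fun a i => PySem.Int.mod (a * i) m) a1

-- ===== PRECONDITION & SPEC =====
def Spec_numPrimeArrangements (n : Int) (out : Int) : Prop := out = numPrimeArrangements_alt n
instance (n : Int) (out : Int) : Decidable (Spec_numPrimeArrangements n out) := by unfold Spec_numPrimeArrangements; infer_instance

-- ===== CLAIM (what is proved, stated in full; the proofs are below) =====
def Claim_equal_numPrimeArrangements : Prop := ∀ (n : Int), Dom_numPrimeArrangements n → Spec_numPrimeArrangements n (numPrimeArrangements n)

-- ===== LEMMAS AND PROOFS =====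

-- ---- B side: trial division decides Nat.Prime ----

theorem pv_trial_spec (k d : Int) :
    2 ≤ d → (pvTrialLoop k d = true ↔ ∀ e : Int, d ≤ e → e * e ≤ k → ¬ (e ∣ k)) := by
  fun_induction pvTrialLoop k d
  all_goals intro hd
  · rename_i d h hm
    simp only [Bool.false_eq_true, false_iff]
    push Not
    exact ⟨d, le_refl d, h, by rwa [← PySem.Int.mod_eq_zero_iff_dvd, ← beq_iff_eq]⟩
  · rename_i d h hm ih
    rw [ih (by omega)]
    constructor
    · intro hall e he hek hdvd
      rcases eq_or_lt_of_le he with rfl | hlt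
      · have hm' : ¬ PySem.Int.mod k d = 0 := by simpa using hm
        exact hm' ((PySem.Int.mod_eq_zero_iff_dvd k d).mpr hdvd)
      · exact hall e (by omega) hek hdvd
    · intro hall e he hek hdvd; exact hall e (by omega) hek hdvd
  · rename_i d h
    simp only [true_iff]
    intro e he hek hdvd
    have : d * d ≤ e * e := by nlinarith
    omega

theorem pv_isPrime_eq (x : Nat) : pvIsPrime (x : Int) = decide x.Prime := by
  by_cases hx : x < 2
  · have hnp : ¬ x.Prime := fun h => by have := h.two_le; omega
    have hxi : (x : Int) < 2 := by exact_mod_cast hx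
    simp [pvIsPrime, hxi, hnp]
  · push Not at hx
    have hxi : ¬ ((x : Int) < 2) := by push Not; exact_mod_cast hx
    rw [pvIsPrime, if_neg hxi]
    by_cases hp : x.Prime
    · simp only [hp, decide_true]
      rw [pv_trial_spec _ _ (le_refl 2)]
      intro e he hek hdvd
      have he0 : (0:Int) ≤ e := by omega
      lift e to ℕ using he0 with m
      have hm2 : 2 ≤ m := by exact_mod_cast he
      have hmd : m ∣ x := by exact_mod_cast hdvd
      have hmk : m * m ≤ x := by exact_mod_cast hek
      rcases Nat.Prime.eq_one_or_self_of_dvd hp m hmd with h1 | h1 <;> nlinarith [hp.two_le]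
    · simp only [hp, decide_false]
      rw [← Bool.not_eq_true, pv_trial_spec _ _ (le_refl 2)]
      intro hall
      have hx0 : 0 < x := by omega
      have hq2 : 2 ≤ x.minFac := (Nat.minFac_prime (by omega : x ≠ 1)).two_le
      have hqs : x.minFac * x.minFac ≤ x := by
        simpa [Nat.pow_two] using Nat.minFac_sq_le_self hx0 hp
      exact hall ↑x.minFac (by exact_mod_cast hq2) (by exact_mod_cast hqs)
        (by exact_mod_cast Nat.minFac_dvd x)

-- B's counting loop = number of primes below n+1
theorem pv_bcount (n : Int) :
    (PySem.List.pyRange 2 (n+1) 1).foldl (fun acc k => if pvIsPrime k then acc + 1 else acc) (0:Int)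
      = ((List.range (n+1).toNat).countP (fun x => decide x.Prime) : Int) := by
  rw [PySem.List.foldl_if_add_one, zero_add]
  congr 1
  rw [PySem.List.pyRange_one, List.countP_map]
  rcases le_or_gt n 1 with hn | hn
  · have h1 : (n + 1 - 2).toNat = 0 := by omega
    have h2 : (n+1).toNat ≤ 2 := by omega
    rw [h1]
    interval_cases h : (n+1).toNat <;> decide
  · have h1 : (n + 1 - 2).toNat = (n - 1).toNat := by omega
    have h2 : (n+1).toNat = 2 + (n-1).toNat := by omega
    rw [h1, h2, List.range_add, List.countP_append, List.countP_map]
    have h3 : (List.range 2).countP (fun x => decide x.Prime) = 0 := by decide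
    rw [h3, zero_add]
    apply List.countP_congr
    intro x _
    have : ((2:Int) + (x:Int)) = ((2 + x : Nat) : Int) := by push_cast; ring
    simp only [Function.comp, this, pv_isPrime_eq]

-- ---- modular product folds ----

theorem pv_foldmod_ne (M : Int) (hM : 0 < M) (l : List Int) (a : Int) (h : l ≠ []) :
    l.foldl (fun a i => PySem.Int.mod (a * i) M) a = (a * l.prod) % M := by
  induction l generalizing a with
  | nil => exact absurd rfl h
  | cons x t ih =>
    cases t with
    | nil => simp [PySem.Int.mod_eq_emod_of_pos hM]
    | cons y s =>
      rw [List.foldl_cons, ih _ (by simp), PySem.Int.mod_eq_emod_of_pos hM]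
      rw [List.prod_cons, Int.mul_emod ((a*x) % M), Int.emod_emod_of_dvd _ dvd_rfl,
        ← Int.mul_emod, mul_assoc]
      simp

theorem pv_foldmod (M : Int) (hM : 0 < M) (l : List Int) (a : Int) :
    (l.foldl (fun a i => PySem.Int.mod (a * i) M) a) % M = (a * l.prod) % M := by
  rcases eq_or_ne l [] with rfl | h
  · simp
  · rw [pv_foldmod_ne M hM l a h, Int.emod_emod_of_dvd _ dvd_rfl]

-- the descending product range(k, 0, -1) has the same product as range(1, k+1)
theorem pv_prod_desc (k : Int) :
    (PySem.List.pyRange k 0 (-1)).prod = (PySem.List.pyRange 1 (k+1) 1).prod := by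
  rw [PySem.List.pyRange_neg_one_eq_reverse, List.prod_reverse]
  norm_num

-- ---- counting helpers ----

theorem pv_countP_not (l : List Nat) (p : Nat → Bool) :
    l.countP p + l.countP (fun x => !p x) = l.length := by
  induction l with
  | nil => simp
  | cons x t ih =>
    by_cases h : p x = true <;> simp [h, ← ih] <;> omega

-- primes + composites in [0, 2+t) = t
theorem pv_partition (t : Nat) :
    (List.range (2 + t)).countP (fun x => decide x.Prime)
      + (List.range (2 + t)).countP (fun x => decide (2 ≤ x ∧ ¬ x.Prime)) = t := by
  rw [List.range_add]
  simp only [List.countP_append, List.countP_map]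
  have h2 : (List.range 2).countP (fun x => decide x.Prime) = 0 := by decide
  have h2' : (List.range 2).countP (fun x => decide (2 ≤ x ∧ ¬ x.Prime)) = 0 := by decide
  rw [h2, h2']
  have hc : List.countP ((fun x => decide (2 ≤ x ∧ ¬ x.Prime)) ∘ (fun x => 2 + x)) (List.range t)
      = List.countP (fun x => !((fun x => decide x.Prime) ∘ (fun x => 2 + x)) x) (List.range t) := by
    apply List.countP_congr
    intro x _
    simp [Function.comp]
  rw [hc]
  simpa using pv_countP_not (List.range t) ((fun x => decide x.Prime) ∘ (fun x => 2 + x))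

theorem pv_count_of_pointwise (l : List Int) (P : Nat → Prop) [DecidablePred P]
    (h : ∀ x (hx : x < l.length), l[x] = if P x then (1:Int) else 0) :
    l.count 1 = (List.range l.length).countP (fun x => decide (P x)) := by
  have hl : l = (List.range l.length).map (fun x => if P x then (1:Int) else 0) := by
    apply List.ext_getElem (by simp)
    intro i h1 h2
    simpa using h i h1
  conv_lhs => rw [hl]
  rw [List.count_eq_countP, List.countP_map]
  apply List.countP_congr
  intro x _
  by_cases hp : P x <;> simp [Function.comp, hp]

-- ---- A side: the sieve marks exactly the composites with small least factor ----

-- the sieve's mark invariant: x is composite with least prime factor below i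
abbrev pvM (i x : Nat) : Prop := 2 ≤ x ∧ ¬ x.Prime ∧ x.minFac < i

def pvInnerFold (i t : Nat) (l : List Int) (c : Int) : List Int × Int :=
  (List.range t).foldl (fun st (k : Nat) => pvSieveInner st (((i*i : Nat) : Int) + (i:Int) * (k : Int))) (l, c)

theorem pv_inner_aux (n : Int) (i : Nat) (hi : 2 ≤ i)
    (l : List Int) (c : Int)
    (hlen : l.length = (n+1).toNat)
    (hpt : ∀ x (hx : x < l.length), l[x] = if pvM i x then (1:Int) else 0)
    (hc : c = 1 + (l.count 1 : Int)) :
    ∀ (t : Nat), ((i*i + i*t : Nat) : Int) ≤ n + i →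
    ((pvInnerFold i t l c).1.length = (n+1).toNat) ∧
    (∀ x (hx : x < (pvInnerFold i t l c).1.length),
      (pvInnerFold i t l c).1[x]
        = if pvM i x ∨ (i ∣ x ∧ i*i ≤ x ∧ x < i*i + i*t) then (1:Int) else 0) ∧
    ((pvInnerFold i t l c).2 = 1 + ((pvInnerFold i t l c).1.count 1 : Int)) := by
  intro t
  induction t with
  | zero =>
    intro _
    simp only [pvInnerFold, List.range_zero, List.foldl_nil]
    refine ⟨hlen, ?_, hc⟩
    intro x hx
    rw [hpt x hx]
    congr 1
    simp only [eq_iff_iff]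
    constructor
    · intro h; exact Or.inl h
    · rintro (h | ⟨_, h1, h2⟩)
      · exact h
      · omega
  | succ t ih =>
    intro hT
    have hT' : ((i*i + i*t : Nat) : Int) ≤ n + i := by push_cast at *; nlinarith
    obtain ⟨ih1, ih2, ih3⟩ := ih hT'
    set st := pvInnerFold i t l c with hst
    have hunf : pvInnerFold i (t+1) l c
        = pvSieveInner st (((i*i : Nat) : Int) + (i:Int) * (t : Int)) := by
      rw [hst, pvInnerFold, pvInnerFold, List.range_succ, List.foldl_append, List.foldl_cons,
        List.foldl_nil]
    have hm : ((i*i : Nat) : Int) + (i:Int) * (t : Int) = ((i*i + i*t : Nat) : Int) := by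
      push_cast; ring
    set m : Nat := i*i + i*t with hmdef
    have hmn : (m : Int) ≤ n := by
      push_cast at hT ⊢
      nlinarith
    have hmlt : m < st.1.length := by
      rw [ih1]
      omega
    have hread : PySem.List.pyGetD st.1 (((i*i : Nat) : Int) + (i:Int) * (t : Int)) 0 = st.1[m] := by
      rw [hm, PySem.List.pyGetD_natCast, List.getD_eq_getElem st.1 0 hmlt]
    have hval : st.1[m] = if pvM i m ∨ (i ∣ m ∧ i*i ≤ m ∧ m < i*i + i*t) then (1:Int) else 0 :=
      ih2 m hmlt
    rw [hunf]
    by_cases hQ : pvM i m ∨ (i ∣ m ∧ i*i ≤ m ∧ m < i*i + i*t)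
    · have hstep : pvSieveInner st (((i*i : Nat) : Int) + (i:Int) * (t : Int)) = st := by
        rw [pvSieveInner, hread, hval, if_pos hQ]
        norm_num
      rw [hstep]
      refine ⟨ih1, ?_, ih3⟩
      intro x hx
      rw [ih2 x hx]
      congr 1
      simp only [eq_iff_iff]
      constructor
      · rintro (h | ⟨h1, h2, h3⟩)
        · exact Or.inl h
        · have hmono : i * (t+1) = i * t + i := by ring
          exact Or.inr ⟨h1, h2, by omega⟩
      · rintro (h | ⟨h1, h2, h3⟩)
        · exact Or.inl h
        · rcases Nat.lt_or_ge x (i*i + i*t) with h4 | h4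
          · exact Or.inr ⟨h1, h2, h4⟩
          · obtain ⟨q, rfl⟩ := h1
            have hq : q = i + t := by nlinarith
            subst hq
            have heq : i * (i + t) = m := by rw [hmdef]; ring
            rw [heq]
            exact hQ
    · have hstep : pvSieveInner st (((i*i : Nat) : Int) + (i:Int) * (t : Int))
          = (st.1.set ((((i*i : Nat) : Int) + (i:Int) * (t : Int)).toNat) 1, st.2 + 1) := by
        rw [pvSieveInner, hread, hval, if_neg hQ]
        norm_num
      have htn : ((((i*i : Nat) : Int) + (i:Int) * (t : Int))).toNat = m := by
        rw [hm, Int.toNat_natCast]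
      rw [hstep, htn]
      have hval0 : st.1[m] = (0:Int) := by rw [hval, if_neg hQ]
      refine ⟨by simpa using ih1, ?_, ?_⟩
      · intro x hx
        have hx' : x < st.1.length := by simpa using hx
        rw [List.getElem_set]
        by_cases hxm : m = x
        · subst hxm
          rw [if_pos rfl, if_pos]
          right
          have hmono : i * (t+1) = i * t + i := by ring
          exact ⟨⟨i + t, by rw [hmdef]; ring⟩, by omega, by omega⟩
        · rw [if_neg hxm, ih2 x hx']
          congr 1
          simp only [eq_iff_iff]
          constructor
          · rintro (h | ⟨h1, h2, h3⟩)
            · exact Or.inl h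
            · have hmono : i * (t+1) = i * t + i := by ring
              exact Or.inr ⟨h1, h2, by omega⟩
          · rintro (h | ⟨h1, h2, h3⟩)
            · exact Or.inl h
            · rcases Nat.lt_or_ge x (i*i + i*t) with h4 | h4
              · exact Or.inr ⟨h1, h2, h4⟩
              · obtain ⟨q, rfl⟩ := h1
                have hq : q = i + t := by nlinarith
                exfalso
                exact hxm (by rw [hmdef, hq]; ring)
      · rw [List.count_set hmlt, ih3, hval0]
        simp
        omega

theorem pv_inner (n : Int) (i : Nat) (hi : 2 ≤ i) (hin : ((i:Int))*((i:Int)) ≤ n)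
    (l : List Int) (c : Int)
    (hlen : l.length = (n+1).toNat)
    (hpt : ∀ x (hx : x < l.length), l[x] = if pvM i x then (1:Int) else 0)
    (hc : c = 1 + (l.count 1 : Int)) :
    ((PySem.List.pyRange ((i:Int)*(i:Int)) (n+1) (i:Int)).foldl pvSieveInner (l, c)).1.length = (n+1).toNat ∧
    (∀ x (hx : x < ((PySem.List.pyRange ((i:Int)*(i:Int)) (n+1) (i:Int)).foldl pvSieveInner (l, c)).1.length),
      ((PySem.List.pyRange ((i:Int)*(i:Int)) (n+1) (i:Int)).foldl pvSieveInner (l, c)).1[x]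
        = if pvM i x ∨ (i ∣ x ∧ i*i ≤ x) then (1:Int) else 0) ∧
    (((PySem.List.pyRange ((i:Int)*(i:Int)) (n+1) (i:Int)).foldl pvSieveInner (l, c)).2
      = 1 + ((((PySem.List.pyRange ((i:Int)*(i:Int)) (n+1) (i:Int)).foldl pvSieveInner (l, c)).1.count 1 : Int))) := by
  have hi0 : (0:Int) < (i:Int) := by exact_mod_cast Nat.lt_of_lt_of_le (by norm_num) hi
  set T : Int := (n + 1 - (i:Int)*(i:Int) + (i:Int) - 1) / (i:Int) with hTdef
  have hab : ((i:Int)*(i:Int)) < n + 1 := by omega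
  have hfold : (PySem.List.pyRange ((i:Int)*(i:Int)) (n+1) (i:Int)).foldl pvSieveInner (l, c)
      = pvInnerFold i T.toNat l c := by
    rw [PySem.List.pyRange_of_pos _ _ hi0, if_pos hab, List.foldl_map, pvInnerFold]
    apply PySem.List.foldl_congr_mem
    intro st k _
    congr 1
  have hT1 : T * (i:Int) ≤ n + 1 - (i:Int)*(i:Int) + (i:Int) - 1 := Int.ediv_mul_le _ (by omega)
  have hT0 : 1 ≤ T := by
    rw [hTdef, Int.le_ediv_iff_mul_le hi0]
    omega
  have hTt : (T.toNat : Int) = T := Int.toNat_of_nonneg (by omega)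
  have hT2 : n < (i:Int)*(i:Int) + (i:Int) * T := by
    have := Int.lt_ediv_add_one_mul_self (n + 1 - (i:Int)*(i:Int) + (i:Int) - 1) hi0
    rw [← hTdef] at this
    nlinarith
  have hub : ((i*i + i*T.toNat : Nat) : Int) ≤ n + (i:Int) := by
    push_cast [hTt]
    nlinarith
  obtain ⟨h1, h2, h3⟩ := pv_inner_aux n i hi l c hlen hpt hc T.toNat hub
  rw [hfold]
  refine ⟨h1, ?_, h3⟩
  intro x hx
  rw [h2 x hx]
  congr 1
  simp only [eq_iff_iff]
  have hxn : (x : Int) ≤ n := by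
    have := hx
    rw [h1] at this
    omega
  constructor
  · rintro (h | ⟨ha, hb, _⟩)
    · exact Or.inl h
    · exact Or.inr ⟨ha, hb⟩
  · rintro (h | ⟨ha, hb⟩)
    · exact Or.inl h
    · refine Or.inr ⟨ha, hb, ?_⟩
      have : (x : Int) < ((i*i + i*T.toNat : Nat) : Int) := by
        push_cast [hTt]
        nlinarith
      exact_mod_cast this

-- predicate step when the new idx value i was unmarked (marking branch)
theorem pv_step_mark (i x : Nat) (hi : 2 ≤ i) :
    (pvM i x ∨ (i ∣ x ∧ i*i ≤ x)) ↔ pvM (i+1) x := by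
  constructor
  · rintro (⟨h1, h2, h3⟩ | ⟨hdvd, hsq⟩)
    · exact ⟨h1, h2, by omega⟩
    · have hii : 4 ≤ i*i := by nlinarith
      have hix : i < x := by nlinarith
      have hx2 : 2 ≤ x := by omega
      have hnp : ¬ x.Prime := by
        intro hp
        rcases hp.eq_one_or_self_of_dvd i hdvd with h | h <;> omega
      have hle : x.minFac ≤ i := Nat.minFac_le_of_dvd hi hdvd
      exact ⟨hx2, hnp, by omega⟩
  · rintro ⟨h1, h2, h3⟩
    rcases Nat.lt_or_ge x.minFac i with h4 | h4
    · exact Or.inl ⟨h1, h2, h4⟩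
    · have heq : x.minFac = i := by omega
      refine Or.inr ⟨heq ▸ Nat.minFac_dvd x, ?_⟩
      have := Nat.minFac_sq_le_self (by omega : 0 < x) h2
      rw [heq] at this
      nlinarith [this]

-- predicate step when the idx value i was already marked (composite)
theorem pv_step_skip (i x : Nat) (hMi : pvM i i) : pvM i x ↔ pvM (i+1) x := by
  obtain ⟨hi2, hinp, _⟩ := hMi
  constructor
  · rintro ⟨h1, h2, h3⟩; exact ⟨h1, h2, by omega⟩
  · rintro ⟨h1, h2, h3⟩
    refine ⟨h1, h2, ?_⟩
    rcases Nat.lt_or_ge x.minFac i with h4 | h4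
    · exact h4
    · have heq : x.minFac = i := by omega
      exact absurd (heq ▸ Nat.minFac_prime (by omega : x ≠ 1)) hinp

theorem pv_outer (n : Int) (l : List Int) (c idx : Int) :
    2 ≤ idx →
    l.length = (n+1).toNat →
    (∀ x (hx : x < l.length), l[x] = if pvM idx.toNat x then (1:Int) else 0) →
    c = 1 + (l.count 1 : Int) →
    (pvSieveLoop n l c idx).2
      = 1 + (((List.range (n+1).toNat).countP (fun x => decide (2 ≤ x ∧ ¬ x.Prime))) : Int) := by
  fun_induction pvSieveLoop n l c idx with
  | case1 l c idx h hm st ih =>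
    intro h2 hlen hpt hc
    have hidxi : ((idx.toNat : Int)) = idx := Int.toNat_of_nonneg (by omega)
    set i : Nat := idx.toNat with hidef
    have hi2 : 2 ≤ i := by omega
    have key := pv_inner n i hi2 (by rw [hidxi]; exact h) l c hlen hpt hc
    rw [hidxi] at key
    obtain ⟨k1, k2, k3⟩ := key
    apply ih (by omega) k1 _ k3
    intro x hx
    rw [k2 x hx]
    have : (idx + 1).toNat = i + 1 := by omega
    rw [this]
    congr 1
    simp only [eq_iff_iff]
    exact pv_step_mark i x hi2
  | case2 l c idx h hm ih =>
    intro h2 hlen hpt hc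
    have hidxi : ((idx.toNat : Int)) = idx := Int.toNat_of_nonneg (by omega)
    set i : Nat := idx.toNat with hidef
    have hi2 : 2 ≤ i := by omega
    have hidxn : idx ≤ n := by nlinarith [mul_self_nonneg idx, mul_self_nonneg (idx - 1)]
    have hilt : i < l.length := by rw [hlen]; omega
    have hread : PySem.List.pyGetD l idx 0 = l[i] := by
      rw [← hidxi, PySem.List.pyGetD_natCast, List.getD_eq_getElem l 0 hilt]
    have hMi : pvM i i := by
      by_contra hno
      rw [hread, hpt i hilt, if_neg hno] at hm
      exact hm (by norm_num)
    apply ih (by omega) hlen _ hc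
    intro x hx
    rw [hpt x hx]
    have : (idx + 1).toNat = i + 1 := by omega
    rw [this]
    congr 1
    simp only [eq_iff_iff]
    exact pv_step_skip i x hMi
  | case3 l c idx h =>
    intro h2 hlen hpt hc
    have hidxi : ((idx.toNat : Int)) = idx := Int.toNat_of_nonneg (by omega)
    set i : Nat := idx.toNat with hidef
    show c = _
    rw [hc, pv_count_of_pointwise l (pvM i) hpt, hlen]
    congr 2
    apply List.countP_congr
    intro x hxmem
    simp only [decide_eq_true_eq]
    have hxn : (x : Int) ≤ n := by
      rw [List.mem_range] at hxmem
      omega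
    constructor
    · rintro ⟨h1', h2', _⟩; exact ⟨h1', h2'⟩
    · rintro ⟨h1', h2'⟩
      refine ⟨h1', h2', ?_⟩
      have hsq := Nat.minFac_sq_le_self (by omega : 0 < x) h2'
      rw [pow_two] at hsq
      have hxi : x < i * i := by
        have hii : ((i*i : Nat) : Int) = idx * idx := by push_cast [hidxi]; ring
        have : (x:Int) < ((i*i : Nat):Int) := by rw [hii]; omega
        exact_mod_cast this
      have := Nat.mul_self_lt_mul_self_iff.mp (Nat.lt_of_le_of_lt hsq hxi)
      omega

-- ---- main equivalence ----

theorem pv_main (n : Int) : numPrimeArrangements n = numPrimeArrangements_alt n := by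
  have hM : (0:Int) < 1000000007 := by norm_num
  set C : Nat := (List.range (n+1).toNat).countP (fun x => decide (2 ≤ x ∧ ¬ x.Prime)) with hC
  set P : Nat := (List.range (n+1).toNat).countP (fun x => decide x.Prime) with hP
  have hcnt : (pvSieveLoop n (List.replicate (n+1).toNat (0:Int)) 1 2).2 = 1 + (C:Int) := by
    apply pv_outer n _ _ 2 (le_refl 2)
    · simp
    · intro x hx
      rw [List.getElem_replicate, if_neg]
      rintro ⟨hx2, hnp, hlt⟩
      have := (Nat.minFac_prime (by omega : x ≠ 1)).two_le
      omega
    · simp [List.count_replicate]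
  simp only [numPrimeArrangements, numPrimeArrangements_alt]
  rw [hcnt, pv_bcount n, ← hP]
  rcases le_or_gt n 0 with hn | hn
  · -- n ≤ 0 : everything degenerates to 1
    have hN1 : (n+1).toNat ≤ 1 := by omega
    have hC0 : C = 0 := by
      rw [hC, List.countP_eq_zero]
      intro a ha
      rw [List.mem_range] at ha
      simp only [decide_eq_true_eq]
      omega
    have hP0 : P = 0 := by
      rw [hP, List.countP_eq_zero]
      intro a ha
      rw [List.mem_range] at ha
      have : a = 0 := by omega
      subst this
      simp [Nat.not_prime_zero]
    rw [hC0, hP0]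
    norm_num
    rw [PySem.List.pyRange_neg_one_eq_nil (by omega : n - 1 ≤ 0), List.foldl_nil]
    rw [PySem.List.pyRange_neg_one_cons (by norm_num : (0:Int) < 1),
      show (1:Int) - 1 = 0 by norm_num,
      PySem.List.pyRange_neg_one_eq_nil (le_refl (0:Int)),
      PySem.List.pyRange_one_eq_nil (by omega : n + 1 ≤ 1)]
    simp
  · -- n ≥ 1
    have hNt : (n+1).toNat = 2 + (n-1).toNat := by omega
    have hCP : (C:Int) + (P:Int) = n - 1 := by
      have := pv_partition (n-1).toNat
      rw [← hNt, ← hC, ← hP] at this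
      have h' := congrArg (fun t : Nat => (t : Int)) this
      push_cast at h'
      omega
    have hPn : n - (1 + (C:Int)) = (P:Int) := by omega
    have hcn : (1:Int) + (C:Int) = n - (P:Int) := by omega
    rw [hPn, hcn]
    have hA : PySem.Int.mod ((PySem.List.pyRange (n-(P:Int)) 0 (-1)).foldl
          (fun a i => PySem.Int.mod (a*i) 1000000007)
          ((PySem.List.pyRange (P:Int) 0 (-1)).foldl
            (fun a i => PySem.Int.mod (a*i) 1000000007) 1)) 1000000007
        = ((PySem.List.pyRange 1 ((P:Int)+1) 1).prod
            * (PySem.List.pyRange 1 (n-(P:Int)+1) 1).prod) % 1000000007 := by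
      rw [PySem.Int.mod_eq_emod_of_pos hM, pv_foldmod _ hM, Int.mul_emod, pv_foldmod _ hM,
        one_mul, ← Int.mul_emod, pv_prod_desc, pv_prod_desc]
    rw [hA]
    have hPle : (P:Int) ≤ n - 1 := by omega
    have hL2 : PySem.List.pyRange 1 (n-(P:Int)+1) 1 ≠ [] := by
      rw [PySem.List.pyRange_one_cons (by omega)]
      exact List.cons_ne_nil _ _
    rw [pv_foldmod_ne _ hM _ _ hL2]
    rcases Nat.eq_zero_or_pos P with hP0 | hPpos
    · rw [hP0]
      norm_num
    · have hP1 : (1:Int) < (P:Int) + 1 := by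
        have : (1:Int) ≤ (P:Int) := by exact_mod_cast hPpos
        omega
      have hL1 : PySem.List.pyRange 1 ((P:Int)+1) 1 ≠ [] := by
        rw [PySem.List.pyRange_one_cons hP1]
        exact List.cons_ne_nil _ _
      rw [pv_foldmod_ne _ hM _ _ hL1, one_mul]
      conv_rhs => rw [Int.mul_emod, Int.emod_emod_of_dvd _ dvd_rfl, ← Int.mul_emod]

-- ===== VERDICT (by name: the statement is the Claim_ definition above) =====
theorem numPrimeArrangements_spec : Claim_equal_numPrimeArrangements := by
  intro n _
  unfold Spec_numPrimeArrangements
  exact pv_main n
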